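-- pv_equiv track=rewrite | github.com/caiquefilipini/chatbot-whatsapp-collections | src/functions.py | _calcula_ciclo
-- ===== SOURCE A (Python) =====
-- def _calcula_ciclo(dias_atraso):
--     """
--     Transforma a variável "dias_atraso" em ciclo.
--
--     Returns:
--     str: Ciclo relativo aos dias em atraso.
--     """
--
--     ciclos = [
--         (30, "Ciclo 1"),
--         (60, "Ciclo 2"),
--         (90, "Ciclo 3"),
--         (120, "Ciclo 4"),
--         (150, "Ciclo 5"),
--     ]
--
--     for limite, ciclo in ciclos:
--         if dias_atraso <= limite:
--             return ciclo
--
--     return "Ciclo 6"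
-- ===== SOURCE B (Python) =====
-- def _calcula_ciclo(dias_atraso):
--     """
--     Transforma a variável "dias_atraso" em ciclo.
--
--     Returns:
--     str: Ciclo relativo aos dias em atraso.
--     """
--     num = min(max(-(-dias_atraso // 30), 1), 6)
--     return f"Ciclo {num}"
-- ===== Notes on version B (the rewrite author's own statement) =====
-- stated objective: simpler
-- what changed: Replaces the threshold-table loop with a closed-form ceiling division: num = min(max(ceil(dias_atraso/30), 1), 6), returned as f"Ciclo {num}".
import Mathlib
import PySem

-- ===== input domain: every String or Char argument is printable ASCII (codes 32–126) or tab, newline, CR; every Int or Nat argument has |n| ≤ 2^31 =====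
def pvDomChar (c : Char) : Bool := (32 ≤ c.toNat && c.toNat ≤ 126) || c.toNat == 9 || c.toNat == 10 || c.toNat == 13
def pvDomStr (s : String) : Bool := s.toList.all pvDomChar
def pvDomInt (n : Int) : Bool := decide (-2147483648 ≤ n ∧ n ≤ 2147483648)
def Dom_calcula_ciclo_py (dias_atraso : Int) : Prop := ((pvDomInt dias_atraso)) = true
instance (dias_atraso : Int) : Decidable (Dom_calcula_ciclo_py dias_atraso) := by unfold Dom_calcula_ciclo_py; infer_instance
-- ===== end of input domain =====

-- B replaces A's threshold-table loop with a closed-form ceiling division clamped to [1,6]; simpler, same cost.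

-- ===== PORT A =====
-- the 'for limite, ciclo in ciclos' loop with early return, as structural recursion over the table
def calcula_ciclo_loop (ciclos : List (Int × String)) (dias_atraso : Int) : String :=
  match ciclos with
  | [] => "Ciclo 6"
  | (limite, ciclo) :: rest =>
      if dias_atraso ≤ limite then ciclo else calcula_ciclo_loop rest dias_atraso

def calcula_ciclo_py (dias_atraso : Int) : String :=
  calcula_ciclo_loop
    [(30, "Ciclo 1"), (60, "Ciclo 2"), (90, "Ciclo 3"), (120, "Ciclo 4"), (150, "Ciclo 5")]
    dias_atraso

-- ===== PORT B =====
def calcula_ciclo_py_alt (dias_atraso : Int) : String :=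
  let num := min (max (-(PySem.Int.floordiv (-dias_atraso) 30)) 1) 6
  "Ciclo " ++ PySem.Int.toStr num

-- ===== PRECONDITION & SPEC =====
def Spec_calcula_ciclo_py (dias_atraso : Int) (out : String) : Prop := out = calcula_ciclo_py_alt dias_atraso
instance (dias_atraso : Int) (out : String) : Decidable (Spec_calcula_ciclo_py dias_atraso out) := by unfold Spec_calcula_ciclo_py; infer_instance

-- ===== CLAIM (what is proved, stated in full; the proofs are below) =====
def Claim_equal_calcula_ciclo_py : Prop := ∀ (dias_atraso : Int), Dom_calcula_ciclo_py dias_atraso → Spec_calcula_ciclo_py dias_atraso (calcula_ciclo_py dias_atraso)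

-- ===== LEMMAS AND PROOFS =====

-- the clamped ceiling division in B takes the value q exactly on A's q-th band
theorem pv_ceil_band (d q : Int) (h1 : (q - 1) * 30 < d) (h2 : d ≤ q * 30) :
    -(PySem.Int.floordiv (-d) 30) = q :=
  (PySem.Int.neg_floordiv_neg_eq_iff_of_pos (by norm_num)).2 ⟨h1, h2⟩

theorem pv_ceil_le_one (d : Int) (h : d ≤ 30) : -(PySem.Int.floordiv (-d) 30) ≤ 1 := by
  have h' : (-1 : Int) * 30 ≤ -d := by omega
  have := (PySem.Int.le_floordiv_iff_mul_le (a := -d) (b := 30) (q := -1) (by norm_num)).2 h'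
  omega

theorem pv_six_le_ceil (d : Int) (h : 150 < d) : 6 ≤ -(PySem.Int.floordiv (-d) 30) := by
  have h' : -d < (-5 : Int) * 30 := by omega
  have := (PySem.Int.floordiv_lt_iff_lt_mul (a := -d) (b := 30) (q := -5) (by norm_num)).2 h'
  omega

-- ===== VERDICT (by name: the statement is the Claim_ definition above) =====
theorem calcula_ciclo_py_spec : Claim_equal_calcula_ciclo_py := by
  intro d _
  unfold Spec_calcula_ciclo_py calcula_ciclo_py calcula_ciclo_py_alt
  simp only [calcula_ciclo_loop]
  rcases (by omega : d ≤ 30 ∨ 30 < d) with h | h1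
  · have hc := pv_ceil_le_one d h
    rw [if_pos h]
    have : min (max (-(PySem.Int.floordiv (-d) 30)) 1) 6 = 1 := by omega
    rw [this]; decide
  · rcases (by omega : d ≤ 60 ∨ 60 < d) with h | h2
    · rw [if_neg (by omega), if_pos h, pv_ceil_band d 2 (by omega) (by omega)]; decide
    · rcases (by omega : d ≤ 90 ∨ 90 < d) with h | h3
      · rw [if_neg (by omega), if_neg (by omega), if_pos h,
            pv_ceil_band d 3 (by omega) (by omega)]; decide
      · rcases (by omega : d ≤ 120 ∨ 120 < d) with h | h4
        · rw [if_neg (by omega), if_neg (by omega), if_neg (by omega), if_pos h,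
              pv_ceil_band d 4 (by omega) (by omega)]; decide
        · rcases (by omega : d ≤ 150 ∨ 150 < d) with h | h5
          · rw [if_neg (by omega), if_neg (by omega), if_neg (by omega), if_neg (by omega),
                if_pos h, pv_ceil_band d 5 (by omega) (by omega)]; decide
          · have hc := pv_six_le_ceil d h5
            rw [if_neg (by omega), if_neg (by omega), if_neg (by omega), if_neg (by omega),
                if_neg (by omega)]
            have : min (max (-(PySem.Int.floordiv (-d) 30)) 1) 6 = 6 := by omega
            rw [this]; decide
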